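-- pv_equiv track=rewrite | github.com/zhuang5252/ARCoarseProject_perf | air_track/detector/special_test/check_and_change_distance.py | find_prev_normal_idx
-- ===== SOURCE A (Python) =====
-- def find_prev_normal_idx(peaks, idx):
--     """递归找前一个正常数据的idx索引"""
--     if idx < 0:
--         return 0
--         # assert 'Not find prev_idx, or data all error.'
--     if idx in peaks:
--         idx -= 1
--         return find_prev_normal_idx(peaks, idx)
--     else:
--         return idx
-- ===== SOURCE B (Python) =====
-- def find_prev_normal_idx(peaks, idx):
--     """Iteratively walk left past peak indices; clamp a negative result to 0."""
--     while idx >= 0 and idx in peaks: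
--         idx -= 1
--     return 0 if idx < 0 else idx
-- ===== Notes on version B (the rewrite author's own statement) =====
-- stated objective: simpler
-- what changed: Replaced the recursion (guard idx<0 first, then membership test, recursive call) by a single iterative while-loop that walks left while idx>=0 and idx is a peak, with one final clamp of a negative result to 0.
import Mathlib
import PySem

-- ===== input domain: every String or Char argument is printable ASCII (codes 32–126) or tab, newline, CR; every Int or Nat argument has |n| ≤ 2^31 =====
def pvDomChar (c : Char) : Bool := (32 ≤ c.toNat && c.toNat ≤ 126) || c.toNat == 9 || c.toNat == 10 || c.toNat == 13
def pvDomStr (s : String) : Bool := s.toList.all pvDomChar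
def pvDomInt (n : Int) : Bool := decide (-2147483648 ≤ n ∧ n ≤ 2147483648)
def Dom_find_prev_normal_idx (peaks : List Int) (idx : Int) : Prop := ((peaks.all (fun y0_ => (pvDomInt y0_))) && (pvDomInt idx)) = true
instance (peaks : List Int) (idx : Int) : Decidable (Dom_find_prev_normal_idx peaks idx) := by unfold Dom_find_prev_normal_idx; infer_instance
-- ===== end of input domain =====

-- B replaces A's recursion by an iterative walk-left loop with a final clamp to 0 (objective: simpler).

-- ===== PORT A =====
-- literal port of A's recursion: negative guard, membership test, recursive call
def find_prev_normal_idx (peaks : List Int) (idx : Int) : Int :=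
  if idx < 0 then 0
  else if peaks.contains idx then find_prev_normal_idx peaks (idx - 1)
  else idx
termination_by (idx + 1).toNat
decreasing_by omega

-- ===== PORT B =====
-- the while loop `while idx >= 0 and idx in peaks: idx -= 1` of Source B
def pvWalkLeft (peaks : List Int) (idx : Int) : Int :=
  if 0 ≤ idx ∧ peaks.contains idx then pvWalkLeft peaks (idx - 1) else idx
termination_by (idx + 1).toNat
decreasing_by omega

def find_prev_normal_idx_alt (peaks : List Int) (idx : Int) : Int :=
  let r := pvWalkLeft peaks idx
  if r < 0 then 0 else r

-- ===== PRECONDITION & SPEC =====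
def Spec_find_prev_normal_idx (peaks : List Int) (idx : Int) (out : Int) : Prop := out = find_prev_normal_idx_alt peaks idx
instance (peaks : List Int) (idx : Int) (out : Int) : Decidable (Spec_find_prev_normal_idx peaks idx out) := by unfold Spec_find_prev_normal_idx; infer_instance

-- ===== CLAIM (what is proved, stated in full; the proofs are below) =====
def Claim_equal_find_prev_normal_idx : Prop := ∀ (peaks : List Int) (idx : Int), Dom_find_prev_normal_idx peaks idx → Spec_find_prev_normal_idx peaks idx (find_prev_normal_idx peaks idx)

-- ===== LEMMAS AND PROOFS =====
theorem find_prev_eq_alt (peaks : List Int) (idx : Int) :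
    find_prev_normal_idx peaks idx = find_prev_normal_idx_alt peaks idx := by
  induction idx using find_prev_normal_idx.induct peaks with
  | case1 idx h =>
    rw [find_prev_normal_idx, if_pos h]
    unfold find_prev_normal_idx_alt
    rw [pvWalkLeft, if_neg (by omega : ¬ (0 ≤ idx ∧ peaks.contains idx))]
    simp only [if_pos h]
  | case2 idx h hc ih =>
    rw [find_prev_normal_idx, if_neg h, if_pos hc, ih]
    unfold find_prev_normal_idx_alt
    conv_rhs => rw [pvWalkLeft, if_pos (And.intro (by omega) hc)]
  | case3 idx h hc =>
    rw [find_prev_normal_idx, if_neg h, if_neg hc]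
    unfold find_prev_normal_idx_alt
    rw [pvWalkLeft,
      if_neg (fun hp => hc hp.2 : ¬ (0 ≤ idx ∧ peaks.contains idx = true))]
    simp only [if_neg (by omega : ¬ idx < 0)]

-- ===== VERDICT (by name: the statement is the Claim_ definition above) =====
theorem find_prev_normal_idx_spec : Claim_equal_find_prev_normal_idx := by
  intro peaks idx _
  unfold Spec_find_prev_normal_idx
  exact find_prev_eq_alt peaks idx
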